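-- pv_equiv track=rewrite | github.com/drunkCamel/esoteric-app | backend/app/utils/common.py | all_possibilites_digts_recursion_version
-- ===== SOURCE A (Python) =====
-- from itertools import product
--
-- def calculate_digit_sum(number_int: int | int) -> int:
--     """Convert number to list of digits and sum them"""
--     return sum(int(d) for d in str(number_int))
--
-- def recursive_digit(number_int: int) -> int:
--     """Recursively reduce number to single digit"""
--     if number_int <= 9:
--         return number_int
--     return recursive_digit(calculate_digit_sum(number_int))
--
-- def all_possibilites_digts_recursion_version(namelist: list) -> list[int]:
--    # Get the sum of each sublist
--     totals = [sum(sublist) for sublist in namelist]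
--
--     # For each total, create options [original, reduced]
--     value_options = []
--     for val in totals:
--         reduced = recursive_digit(val)
--         if val == reduced:
--             # Single digit, only one option
--             value_options.append([val])
--         else:
--             # Multi-digit, two options: original and reduced
--             value_options.append([val, reduced])
--
--     # Generate all combinations using product
--     all_sums = set()
--     for combo in product(*value_options):
--         all_sums.add(sum(combo))
--
--     # Return sorted descending
--     return sorted(all_sums, reverse=True)
-- ===== SOURCE B (Python) =====
-- def calculate_digit_sum(number_int):
--     """Convert number to list of digits and sum them"""
--     return sum(int(d) for d in str(number_int))
--
--
-- def recursive_digit(number_int):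
--     """Recursively reduce number to single digit"""
--     if number_int <= 9:
--         return number_int
--     return recursive_digit(calculate_digit_sum(number_int))
--
--
-- def all_possibilites_digts_recursion_version(namelist: list) -> list[int]:
--     # Incremental subset-sum DP: maintain the set of sums reachable from the
--     # prefix processed so far, in one pass (no product enumeration).
--     sums = {0}
--     for sublist in namelist:
--         val = sum(sublist)
--         reduced = recursive_digit(val)
--         opts = (val,) if val == reduced else (val, reduced)
--         sums = {s + o for s in sums for o in opts}
--     return sorted(sums, reverse=True)
-- ===== Notes on version B (the rewrite author's own statement) =====
-- stated objective: alternative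
-- what changed: Replaces the itertools.product enumeration of all option combinations with an incremental subset-sum DP that carries the set of reachable sums through one pass over the sublists.
import Mathlib
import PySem

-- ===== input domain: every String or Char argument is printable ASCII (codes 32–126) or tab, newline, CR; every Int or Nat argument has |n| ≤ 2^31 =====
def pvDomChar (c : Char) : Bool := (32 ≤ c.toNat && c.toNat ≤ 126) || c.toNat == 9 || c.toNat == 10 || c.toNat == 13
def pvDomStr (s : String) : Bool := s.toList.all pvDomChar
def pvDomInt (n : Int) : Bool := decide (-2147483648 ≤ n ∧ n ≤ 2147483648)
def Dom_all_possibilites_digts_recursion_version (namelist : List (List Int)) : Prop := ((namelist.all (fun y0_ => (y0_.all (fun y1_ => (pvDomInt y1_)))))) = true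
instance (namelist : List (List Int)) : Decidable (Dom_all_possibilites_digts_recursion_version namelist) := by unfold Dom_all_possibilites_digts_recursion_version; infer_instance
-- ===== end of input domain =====

-- B replaces A's itertools.product enumeration of option combinations with an
-- incremental subset-sum DP over the set of reachable sums (objective: alternative).

-- ===== PORT A =====
-- sum(int(d) for d in str(n)); exact whenever str(n) consists of digits only,
-- which holds on every call A/B make (recursive_digit only recurses on n > 9).
def pvCalcDigitSum (n : Int) : Int :=
  ((PySem.Int.toStr n).toList.map
    (fun c => (PySem.Int.ofStr? (String.ofList [c])).getD 0)).foldl (· + ·) 0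

-- recursive_digit, with a fuel guard that only makes the recursion total:
-- for n > 9 the digit sum is far smaller than n, so fuel n.toNat + 1 is never exhausted.
def pvRecursiveDigitFuel : Nat → Int → Int
  | 0, n => n
  | f + 1, n => if n ≤ 9 then n else pvRecursiveDigitFuel f (pvCalcDigitSum n)

def pvRecursiveDigit (n : Int) : Int := pvRecursiveDigitFuel (n.toNat + 1) n

-- itertools.product(*value_options), leftmost factor varying slowest
def pvProduct (l : List (List Int)) : List (List Int) :=
  l.foldr (fun xs acc => xs.flatMap (fun x => acc.map (fun c => x :: c))) [[]]

def all_possibilites_digts_recursion_version (namelist : List (List Int)) : List Int :=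
  let totals := namelist.map (fun sublist => sublist.sum)
  let value_options := totals.foldl (fun acc val =>
    let reduced := pvRecursiveDigit val
    if val = reduced then acc ++ [[val]] else acc ++ [[val, reduced]]) []
  let all_sums : PySem.Set Int := (pvProduct value_options).foldl
    (fun s combo => PySem.Set.add s combo.sum) PySem.Set.empty
  PySem.List.sorted all_sums (fun x => x) true

-- ===== PORT B =====
def all_possibilites_digts_recursion_version_alt (namelist : List (List Int)) : List Int :=
  let sums : PySem.Set Int := namelist.foldl (fun sums sublist =>
    let val := sublist.sum
    let reduced := pvRecursiveDigit val
    let opts := if val = reduced then [val] else [val, reduced]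
    PySem.Set.ofList (sums.flatMap (fun s => opts.map (fun o => s + o))))
    (PySem.Set.ofList [0])
  PySem.List.sorted sums (fun x => x) true

-- ===== PRECONDITION & SPEC =====
def Spec_all_possibilites_digts_recursion_version (namelist : List (List Int)) (out : List Int) : Prop := out = all_possibilites_digts_recursion_version_alt namelist
instance (namelist : List (List Int)) (out : List Int) : Decidable (Spec_all_possibilites_digts_recursion_version namelist out) := by unfold Spec_all_possibilites_digts_recursion_version; infer_instance

-- ===== CLAIM (what is proved, stated in full; the proofs are below) =====
def Claim_equal_all_possibilites_digts_recursion_version : Prop := ∀ (namelist : List (List Int)), Dom_all_possibilites_digts_recursion_version namelist → Spec_all_possibilites_digts_recursion_version namelist (all_possibilites_digts_recursion_version namelist)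

-- ===== LEMMAS AND PROOFS =====

-- the per-sublist option list both programs derive from a sublist total
def pvOpts (val : Int) : List Int :=
  if val = pvRecursiveDigit val then [val] else [val, pvRecursiveDigit val]

-- x is reachable from offset y by adding one choice from each option list
def pvReach : List (List Int) → Int → Int → Prop
  | [], y, x => x = y
  | o :: r, y, x => ∃ v ∈ o, pvReach r (y + v) x

lemma pvReach_product (l : List (List Int)) (y x : Int) :
    (∃ c ∈ pvProduct l, x = y + c.sum) ↔ pvReach l y x := by
  induction l generalizing y with
  | nil => simp [pvProduct, pvReach]
  | cons o r ih =>
    simp only [pvProduct, List.foldr_cons, pvReach]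
    constructor
    · rintro ⟨c, hc, rfl⟩
      simp only [List.mem_flatMap, List.mem_map] at hc
      obtain ⟨v, hv, c', hc', rfl⟩ := hc
      exact ⟨v, hv, (ih (y + v)).mp ⟨c', hc', by simp [List.sum_cons]; ring⟩⟩
    · rintro ⟨v, hv, hr⟩
      obtain ⟨c', hc', rfl⟩ := (ih (y + v)).mpr hr
      refine ⟨v :: c', ?_, ?_⟩
      · exact List.mem_flatMap.mpr ⟨v, hv, List.mem_map.mpr ⟨c', hc', rfl⟩⟩
      · simp [List.sum_cons]; ring

-- B's DP step as a generic fold over option lists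
def pvFoldB (l : List (List Int)) (S0 : List Int) : List Int :=
  l.foldl (fun sums o =>
    PySem.Set.ofList (sums.flatMap (fun s => o.map (fun v => s + v)))) S0

lemma pvFoldB_mem (l : List (List Int)) (S0 : List Int) (x : Int) :
    x ∈ pvFoldB l S0 ↔ ∃ s ∈ S0, pvReach l s x := by
  induction l generalizing S0 with
  | nil => simp [pvFoldB, pvReach]
  | cons o r ih =>
    simp only [pvFoldB, List.foldl_cons] at *
    rw [ih]
    constructor
    · rintro ⟨s', hs', hr⟩
      rw [PySem.Set.mem_ofList, List.mem_flatMap] at hs'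
      obtain ⟨s, hs, hv⟩ := hs'
      rw [List.mem_map] at hv
      obtain ⟨v, hv, rfl⟩ := hv
      exact ⟨s, hs, v, hv, hr⟩
    · rintro ⟨s, hs, v, hv, hr⟩
      refine ⟨s + v, ?_, hr⟩
      rw [PySem.Set.mem_ofList, List.mem_flatMap]
      exact ⟨s, hs, List.mem_map.mpr ⟨v, hv, rfl⟩⟩

lemma pvFoldB_nodup (l : List (List Int)) (S0 : List Int) (h : S0.Nodup) :
    (pvFoldB l S0).Nodup := by
  induction l generalizing S0 with
  | nil => exact h
  | cons o r ih => exact ih _ (PySem.Set.nodup_ofList _)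

-- A's set of combo sums is set(map(sum, product))
lemma pvASet_eq (opts : List (List Int)) :
    (pvProduct opts).foldl (fun s combo => PySem.Set.add s combo.sum) PySem.Set.empty
      = PySem.Set.ofList ((pvProduct opts).map (fun c => c.sum)) := by
  rw [PySem.Set.ofList_eq_foldl, List.foldl_map]
  rfl

-- sorted-descending of two nodup lists with the same elements agree
lemma pvSortedRev_eq_of_perm (xs ys : List Int) (hx : xs.Nodup)
    (hp : xs.Perm ys) :
    PySem.List.sorted xs (fun x => x) true = PySem.List.sorted ys (fun x => x) true := by
  have hzp : (PySem.List.sorted xs (fun x => x) true).Perm xs :=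
    PySem.List.sorted_perm xs (fun x => x) true
  have hzn : (PySem.List.sorted xs (fun x => x) true).Nodup := hzp.nodup_iff.mpr hx
  have hge : (PySem.List.sorted xs (fun x => x) true).Pairwise (fun a b => b ≤ a) :=
    PySem.List.sorted_pairwise_rev xs (fun x => x)
  have hgt : (PySem.List.sorted xs (fun x => x) true).Pairwise (fun a b => b < a) := by
    have := hzn.imp_of_mem (fun {a b} _ _ h => h) |>.and hge
    exact this.imp (fun ⟨hne, hle⟩ => lt_of_le_of_ne hle (Ne.symm hne))
  exact (PySem.List.sorted_rev_eq_of_perm_of_pairwise_gt ys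
    (PySem.List.sorted xs (fun x => x) true) (fun x => x) (hzp.trans hp) hgt).symm

-- ===== VERDICT (by name: the statement is the Claim_ definition above) =====
theorem all_possibilites_digts_recursion_version_spec : Claim_equal_all_possibilites_digts_recursion_version := by
  intro namelist _
  show all_possibilites_digts_recursion_version namelist
      = all_possibilites_digts_recursion_version_alt namelist
  unfold all_possibilites_digts_recursion_version all_possibilites_digts_recursion_version_alt
  simp only []
  -- normalise A's value_options loop to a map
  have hvo : (namelist.map (fun sublist => sublist.sum)).foldl (fun acc val =>
      let reduced := pvRecursiveDigit val
      if val = reduced then acc ++ [[val]] else acc ++ [[val, reduced]]) []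
      = namelist.map (fun sub => pvOpts sub.sum) := by
    have h1 : (namelist.map (fun sublist => sublist.sum)).foldl (fun acc val =>
        let reduced := pvRecursiveDigit val
        if val = reduced then acc ++ [[val]] else acc ++ [[val, reduced]]) []
        = (namelist.map (fun sublist => sublist.sum)).foldl
          (fun acc val => acc ++ [pvOpts val]) [] := by
      apply PySem.List.foldl_congr_mem
      intro acc x _
      simp only [pvOpts]
      split_ifs <;> rfl
    rw [h1, PySem.List.foldl_append_singleton_eq_map, List.nil_append, List.map_map]
    rfl
  rw [hvo]
  -- normalise B's loop to pvFoldB over the same option lists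
  have hb : namelist.foldl (fun sums sublist =>
      let val := sublist.sum
      let reduced := pvRecursiveDigit val
      let opts := if val = reduced then [val] else [val, reduced]
      PySem.Set.ofList (sums.flatMap (fun s => opts.map (fun o => s + o))))
      (PySem.Set.ofList [0])
      = pvFoldB (namelist.map (fun sub => pvOpts sub.sum)) (PySem.Set.ofList [0]) := by
    unfold pvFoldB
    rw [List.foldl_map]
    rfl
  rw [hb]
  set opts' := namelist.map (fun sub => pvOpts sub.sum) with hopts
  rw [pvASet_eq]
  apply pvSortedRev_eq_of_perm
  · exact PySem.Set.nodup_ofList _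
  · apply (List.perm_ext_iff_of_nodup (PySem.Set.nodup_ofList _)
      (pvFoldB_nodup _ _ (PySem.Set.nodup_ofList _))).mpr
    intro x
    rw [PySem.Set.mem_ofList, pvFoldB_mem]
    constructor
    · intro hx
      rw [List.mem_map] at hx
      obtain ⟨c, hc, rfl⟩ := hx
      refine ⟨0, by simp [PySem.Set.mem_ofList], ?_⟩
      exact (pvReach_product opts' 0 c.sum).mp ⟨c, hc, by ring⟩
    · rintro ⟨s, hs, hr⟩
      simp only [PySem.Set.mem_ofList, List.mem_singleton] at hs
      subst hs
      obtain ⟨c, hc, rfl⟩ := (pvReach_product opts' 0 x).mpr hr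
      simp only [zero_add]
      exact List.mem_map.mpr ⟨c, hc, rfl⟩
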